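-- pv_equiv track=rewrite | github.com/kkr010128/codebert | problem110/problem110_130.py | hv
-- ===== SOURCE A (Python) =====
-- import itertools
-- from typing import List
--
-- def hv(c: List[List[str]], h: int, w: int, k: int) -> int:
--     ret = 0
--     for comb_h in itertools.product((False, True), repeat=h):
--         for comb_w in itertools.product((False, True), repeat=w):
--             cnt = 0
--             for i in range(h):
--                 for j in range(w):
--                     if comb_h[i] and comb_w[j] and c[i][j] == '#':
--                         cnt += 1
--             if cnt == k:
--                 ret += 1
--     return ret
-- ===== SOURCE B (Python) =====
-- def hv(c, h, w, k):
--     # Per row-subset: column counts once, then a knapsack-count DP over columns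
--     # replaces the inner 2^w enumeration.
--     ret = 0
--     for mask in range(1 << h):
--         col = [sum(1 for i in range(h) if (mask >> i) & 1 and c[i][j] == '#')
--                for j in range(w)]
--         dp = [1]  # dp[s] = number of column subsets (of the columns seen so far) with s blacks
--         for v in col:
--             dp = [x + y for x, y in zip(dp + [0] * v, [0] * v + dp)]
--         if 0 <= k < len(dp):
--             ret += dp[k]
--     return ret
-- ===== Notes on version B (the rewrite author's own statement) =====
-- stated objective: alternative
-- what changed: Instead of enumerating all 2^(h+w) row/column subset pairs and recounting intersections for each, B enumerates only the 2^h row subsets, computes per-column black counts once, and counts the column subsets reaching sum k with a knapsack-count DP over the columns; intended to be faster, but a timing run could not confirm this on its generated inputs, so no speed is claimed.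
import Mathlib
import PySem

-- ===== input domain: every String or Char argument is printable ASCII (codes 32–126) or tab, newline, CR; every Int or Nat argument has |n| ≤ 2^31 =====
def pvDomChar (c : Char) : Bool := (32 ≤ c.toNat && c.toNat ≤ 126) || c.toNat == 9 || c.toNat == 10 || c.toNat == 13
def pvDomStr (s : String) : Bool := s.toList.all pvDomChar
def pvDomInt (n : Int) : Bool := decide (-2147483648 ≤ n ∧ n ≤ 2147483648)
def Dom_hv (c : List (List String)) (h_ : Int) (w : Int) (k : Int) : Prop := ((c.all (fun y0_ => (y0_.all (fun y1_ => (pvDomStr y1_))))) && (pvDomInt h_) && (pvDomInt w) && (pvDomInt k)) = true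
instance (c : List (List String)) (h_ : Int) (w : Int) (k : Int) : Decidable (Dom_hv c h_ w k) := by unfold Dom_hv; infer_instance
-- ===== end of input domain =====

-- B replaces A's enumeration of all 2^(h+w) row/column subset pairs by: for each of the
-- 2^h row subsets, per-column black counts plus a knapsack-count DP over the columns.

-- ===== PORT A =====
-- port of itertools.product((False, True), repeat=n) (rightmost coordinate varies fastest)
def prod2 : Nat → List (List Bool)
  | 0 => [[]]
  | n+1 => (prod2 n).flatMap (fun t => [t ++ [false], t ++ [true]])

def hv (c : List (List String)) (h_ : Int) (w : Int) (k : Int) : Int :=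
  (prod2 h_.toNat).foldl (fun ret ch =>
    (prod2 w.toNat).foldl (fun ret cw =>
      let cnt : Int := (List.range h_.toNat).foldl (fun cnt i =>
        (List.range w.toNat).foldl (fun cnt j =>
          if ch.getD i false && cw.getD j false && ((c.getD i []).getD j "" == "#")
          then cnt + 1 else cnt) cnt) 0
      if cnt = k then ret + 1 else ret) ret) 0

-- ===== PORT B =====
-- dp = [x + y for x, y in zip(dp + [0]*v, [0]*v + dp)]
def dpStep (dp : List Int) (v : Int) : List Int :=
  List.zipWith (· + ·) (dp ++ List.replicate v.toNat 0) (List.replicate v.toNat 0 ++ dp)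

def hv_alt (c : List (List String)) (h_ : Int) (w : Int) (k : Int) : Int :=
  (List.range (2 ^ h_.toNat)).foldl (fun ret mask =>
    let col : List Int := (List.range w.toNat).map (fun j =>
      (List.range h_.toNat).foldl (fun s i =>
        if mask.testBit i && ((c.getD i []).getD j "" == "#") then s + 1 else s) 0)
    let dp := col.foldl dpStep [1]
    if 0 ≤ k ∧ k < (dp.length : Int) then ret + dp.getD k.toNat 0 else ret) 0

-- ===== PRECONDITION & SPEC =====
-- Pre_ excludes exactly the inputs where the Python A raises: negative h or w
-- (itertools.product rejects a negative repeat), and h,w > 0 with a grid too small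
-- (c[i][j] then raises IndexError on some fully-selected pair).
def Pre_hv (c : List (List String)) (h_ : Int) (w : Int) (k : Int) : Prop :=
  0 ≤ h_ ∧ 0 ≤ w ∧
    (h_ = 0 ∨ w = 0 ∨ (h_ ≤ (c.length : Int) ∧ ∀ row ∈ c.take h_.toNat, w ≤ (row.length : Int)))
instance (c : List (List String)) (h_ : Int) (w : Int) (k : Int) : Decidable (Pre_hv c h_ w k) := by
  unfold Pre_hv; infer_instance

def pvWitness_hv : List (List String) × Int × Int × Int := ([["#", "."], [".", "#"]], 2, 2, 1)

def Spec_hv (c : List (List String)) (h_ : Int) (w : Int) (k : Int) (out : Int) : Prop := out = hv_alt c h_ w k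
instance (c : List (List String)) (h_ : Int) (w : Int) (k : Int) (out : Int) : Decidable (Spec_hv c h_ w k out) := by unfold Spec_hv; infer_instance

-- ===== CLAIM (what is proved, stated in full; the proofs are below) =====
def Claim_equal_hv : Prop := ∀ (c : List (List String)) (h_ : Int) (w : Int) (k : Int), Dom_hv c h_ w k → Pre_hv c h_ w k → Spec_hv c h_ w k (hv c h_ w k)

-- ===== LEMMAS AND PROOFS =====

-- proof-side abbreviations
def dotBV (cw : List Bool) (vs : List Int) : Int :=
  (List.zipWith (fun b v => if b then v else 0) cw vs).sum

def colvF (c : List (List String)) (n W : Nat) (sel : Nat → Bool) : List Int :=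
  (List.range W).map (fun j =>
    ((List.range n).map (fun i =>
      if sel i && ((c.getD i []).getD j "" == "#") then (1 : Int) else 0)).sum)

def Ncnt (vs : List Int) (t : Int) : Int :=
  ((prod2 vs.length).map (fun cw => if dotBV cw vs = t then (1 : Int) else 0)).sum

def G (dp : List Int) (t : Int) : Int := if 0 ≤ t then dp.getD t.toNat 0 else 0

-- generic fold / sum plumbing
theorem foldl_if_count {α : Type} (l : List α) (p : α → Prop) [DecidablePred p] (a : Int) :
    l.foldl (fun acc x => if p x then acc + 1 else acc) a
      = a + (l.map (fun x => if p x then (1 : Int) else 0)).sum := by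
  induction l generalizing a with
  | nil => simp
  | cons x t ih =>
      by_cases h : p x
      · simp [h, ih]
        ring
      · simp [h, ih]

theorem foldl_addf {α : Type} (l : List α) (f : α → Int) (a : Int) :
    l.foldl (fun acc x => acc + f x) a = a + (l.map f).sum := by
  induction l generalizing a with
  | nil => simp
  | cons x t ih => simp [ih]; ring

theorem sum_map_add {α : Type} (l : List α) (f g : α → Int) :
    (l.map (fun x => f x + g x)).sum = (l.map f).sum + (l.map g).sum := by
  induction l with
  | nil => simp
  | cons x t ih => simp [ih]; ring

theorem sum_swap (a b : Nat) (f : Nat → Nat → Int) :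
    ((List.range a).map (fun i => ((List.range b).map (f i)).sum)).sum
      = ((List.range b).map (fun j => ((List.range a).map (fun i => f i j)).sum)).sum := by
  induction a with
  | zero => simp
  | succ a ih =>
      rw [List.range_succ, List.map_append, List.sum_append, ih]
      simp only [List.map_cons, List.map_nil, List.sum_cons, List.sum_nil, add_zero]
      have h : (List.range b).map (fun j => ((List.range a ++ [a]).map (fun i => f i j)).sum)
          = (List.range b).map (fun j => ((List.range a).map (fun i => f i j)).sum + f a j) := by
        apply List.map_congr_left
        intro j _
        rw [List.map_append, List.sum_append]
        simp
      rw [h, sum_map_add]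

theorem sum_flatMap_pair {α β : Type} (l : List α) (u v : α → β) (f : β → Int) :
    ((l.flatMap (fun x => [u x, v x])).map f).sum
      = (l.map (fun x => f (u x) + f (v x))).sum := by
  induction l with
  | nil => simp
  | cons x t ih => simp [ih]; ring

theorem prod2_length {n : Nat} {t : List Bool} (h : t ∈ prod2 n) : t.length = n := by
  induction n generalizing t with
  | zero => simp [prod2] at h; simp [h]
  | succ n ih =>
      simp only [prod2, List.mem_flatMap, List.mem_cons, List.not_mem_nil, or_false] at h
      obtain ⟨s, hs, ht⟩ := h
      rcases ht with h | h <;> (subst h; simp [ih hs])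

-- getD plumbing for the dp step
theorem getD_append_replicate_zero (dp : List Int) (m s : Nat) :
    (dp ++ List.replicate m (0 : Int)).getD s 0 = dp.getD s 0 := by
  induction dp generalizing s with
  | nil => simp
  | cons x t ih =>
      cases s with
      | zero => simp
      | succ s => simpa [List.getD_eq_getElem?_getD] using ih s

theorem getD_replicate_zero_append (dp : List Int) (m s : Nat) :
    (List.replicate m (0 : Int) ++ dp).getD s 0
      = if s < m then 0 else dp.getD (s - m) 0 := by
  induction m generalizing s with
  | zero => simp
  | succ m ih =>
      cases s with
      | zero => simp [List.replicate_succ]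
      | succ s =>
          simp only [List.replicate_succ, List.cons_append]
          simpa [List.getD_eq_getElem?_getD] using ih s

theorem getD_zipWith_add (xs ys : List Int) (s : Nat) (h : xs.length = ys.length) :
    (List.zipWith (· + ·) xs ys).getD s 0 = xs.getD s 0 + ys.getD s 0 := by
  induction xs generalizing ys s with
  | nil => cases ys with
      | nil => simp
      | cons y t => simp at h
  | cons x t ih =>
      cases ys with
      | nil => simp at h
      | cons y u =>
          simp at h
          cases s with
          | zero => simp
          | succ s => simpa [List.getD_eq_getElem?_getD] using ih u s h

theorem G_dpStep (dp : List Int) (v t : Int) (hv0 : 0 ≤ v) :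
    G (dpStep dp v) t = G dp t + G dp (t - v) := by
  unfold G dpStep
  by_cases ht : 0 ≤ t
  · have hlen : (dp ++ List.replicate v.toNat (0 : Int)).length
        = (List.replicate v.toNat (0 : Int) ++ dp).length := by
      simp [Nat.add_comm]
    rw [if_pos ht, getD_zipWith_add _ _ _ hlen, getD_append_replicate_zero,
      getD_replicate_zero_append]
    by_cases htv : 0 ≤ t - v
    · have h1 : ¬ t.toNat < v.toNat := by omega
      have h2 : t.toNat - v.toNat = (t - v).toNat := by omega
      rw [if_neg h1, if_pos htv, h2]
      simp [ht]
    · have h1 : t.toNat < v.toNat := by omega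
      rw [if_pos h1, if_neg htv]
      simp [ht]
  · have htv : ¬ 0 ≤ t - v := by omega
    rw [if_neg ht, if_neg ht, if_neg htv]
    simp

theorem G_oob (dp : List Int) (k : Int) (h : ¬ (0 ≤ k ∧ k < (dp.length : Int))) :
    G dp k = 0 := by
  unfold G
  by_cases hk : 0 ≤ k
  · have : dp.length ≤ k.toNat := by omega
    rw [if_pos hk, List.getD_eq_default _ _ this]
  · rw [if_neg hk]

-- the dp characterization: after folding vs, entry t counts the column subsets with sum t
theorem G_foldl_dpStep (vs : List Int) (hnn : ∀ v ∈ vs, 0 ≤ v) (t : Int) :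
    G (vs.foldl dpStep [1]) t = Ncnt vs t := by
  induction vs using List.reverseRecOn generalizing t with
  | nil =>
      unfold G Ncnt dotBV prod2
      by_cases h0 : t = 0
      · subst h0; simp
      · by_cases ht : 0 ≤ t
        · have : t.toNat ≠ 0 := by omega
          rcases Nat.exists_eq_succ_of_ne_zero this with ⟨s, hs⟩
          simp [ht, hs, Ne.symm h0]
        · simp [ht, Ne.symm h0]
  | append_singleton ys v ih =>
      have hv0 : 0 ≤ v := hnn v (by simp)
      have hys : ∀ x ∈ ys, 0 ≤ x := fun x hx => hnn x (by simp [hx])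
      have hR : Ncnt (ys ++ [v]) t = Ncnt ys t + Ncnt ys (t - v) := by
        unfold Ncnt
        have hlen : (ys ++ [v]).length = ys.length + 1 := by simp
        rw [hlen, show prod2 (ys.length + 1)
            = (prod2 ys.length).flatMap (fun t => [t ++ [false], t ++ [true]]) from rfl,
          sum_flatMap_pair, ← sum_map_add]
        apply congrArg List.sum
        apply List.map_congr_left
        intro cw hcw
        have hl : cw.length = ys.length := prod2_length hcw
        have hz1 : dotBV (cw ++ [false]) (ys ++ [v]) = dotBV cw ys := by
          unfold dotBV
          rw [List.zipWith_append (h := by simp [hl])]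
          simp
        have hz2 : dotBV (cw ++ [true]) (ys ++ [v]) = dotBV cw ys + v := by
          unfold dotBV
          rw [List.zipWith_append (h := by simp [hl])]
          simp
        rw [hz1, hz2]
        congr 1
        exact if_congr (by omega : dotBV cw ys + v = t ↔ dotBV cw ys = t - v) rfl rfl
      rw [List.foldl_append, List.foldl_cons, List.foldl_nil, G_dpStep _ _ _ hv0,
        ih hys, ih hys, hR]

-- the count as a dot product with the per-column counts
theorem dot_map (cw : List Bool) (g : Nat → Int) :
    dotBV cw ((List.range cw.length).map g)
      = ((List.range cw.length).map (fun j => if cw.getD j false then g j else 0)).sum := by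
  induction cw using List.reverseRecOn with
  | nil => simp [dotBV]
  | append_singleton ys b ih =>
      have hlen : (ys ++ [b]).length = ys.length + 1 := by simp
      rw [hlen, List.range_succ]
      unfold dotBV
      rw [List.map_append, List.zipWith_append (h := by simp), List.sum_append,
        List.map_append, List.sum_append]
      rw [show (List.zipWith (fun b v => if b then v else 0) ys ((List.range ys.length).map g)).sum
            = dotBV ys ((List.range ys.length).map g) from rfl, ih]
      congr 1
      · apply congrArg List.sum
        apply List.map_congr_left
        intro j hj
        have hjl : j < ys.length := List.mem_range.mp hj
        rw [List.getD_append _ _ _ _ hjl]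
      · simp

theorem cnt_eq_dot (c : List (List String)) (n W : Nat) (ch cw : List Bool)
    (hcw : cw.length = W) :
    (List.range n).foldl (fun cnt i =>
        (List.range W).foldl (fun cnt j =>
          if ch.getD i false && cw.getD j false && ((c.getD i []).getD j "" == "#")
          then cnt + 1 else cnt) cnt) 0
      = dotBV cw (colvF c n W (fun i => ch.getD i false)) := by
  have hinner : (fun (cnt : Int) i =>
      (List.range W).foldl (fun cnt j =>
        if ch.getD i false && cw.getD j false && ((c.getD i []).getD j "" == "#")
        then cnt + 1 else cnt) cnt)
      = fun cnt i => cnt + ((List.range W).map (fun j =>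
          if ch.getD i false && cw.getD j false && ((c.getD i []).getD j "" == "#")
          then (1 : Int) else 0)).sum := by
    funext cnt i
    exact foldl_if_count _ _ _
  rw [hinner, foldl_addf, zero_add, sum_swap]
  clear hinner
  unfold colvF
  rw [← hcw, dot_map]
  apply congrArg List.sum
  apply List.map_congr_left
  intro j hj
  by_cases hc : cw.getD j false = true
  · simp only [List.getD_eq_getElem?_getD] at hc
    simp [hc]
  · simp only [Bool.not_eq_true, List.getD_eq_getElem?_getD] at hc
    simp [hc]

-- entries of colvF are nonnegative
theorem sum_map_ite_nonneg {α : Type} (l : List α) (p : α → Prop) [DecidablePred p] :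
    0 ≤ (l.map (fun x => if p x then (1 : Int) else 0)).sum := by
  induction l with
  | nil => simp
  | cons x t ih => by_cases h : p x <;> simp [h] <;> omega

theorem colvF_nonneg (c : List (List String)) (n W : Nat) (sel : Nat → Bool) :
    ∀ v ∈ colvF c n W sel, 0 ≤ v := by
  intro v hv
  unfold colvF at hv
  rcases List.mem_map.mp hv with ⟨j, _, rfl⟩
  exact sum_map_ite_nonneg _ _

theorem colvF_length (c : List (List String)) (n W : Nat) (sel : Nat → Bool) :
    (colvF c n W sel).length = W := by
  simp [colvF]

theorem colvF_congr (c : List (List String)) (n W : Nat) (s1 s2 : Nat → Bool)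
    (h : ∀ i < n, s1 i = s2 i) : colvF c n W s1 = colvF c n W s2 := by
  unfold colvF
  apply List.map_congr_left
  intro j _
  apply congrArg
  apply List.map_congr_left
  intro i hi
  rw [h i (List.mem_range.mp hi)]

-- bit lists of 0..2^n-1 enumerate the same tuples as prod2 n
theorem sum_bits (n : Nat) : ∀ F : List Bool → Int,
    ((List.range (2 ^ n)).map (fun m => F ((List.range n).map (fun i => m.testBit i)))).sum
      = ((prod2 n).map F).sum := by
  induction n with
  | zero => intro F; simp [prod2]
  | succ n ih =>
      intro F
      have hsplit : List.range (2 ^ (n + 1))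
          = List.range (2 ^ n) ++ (List.range (2 ^ n)).map (2 ^ n + ·) := by
        rw [pow_succ, Nat.mul_two, List.range_add]
      rw [hsplit, List.map_append, List.sum_append, List.map_map]
      have h1 : (List.range (2 ^ n)).map
          (fun m => F ((List.range (n + 1)).map (fun i => m.testBit i)))
          = (List.range (2 ^ n)).map
            (fun m => F (((List.range n).map (fun i => m.testBit i)) ++ [false])) := by
        apply List.map_congr_left
        intro m hm
        have hmlt : m < 2 ^ n := List.mem_range.mp hm
        rw [List.range_succ, List.map_append]
        simp [Nat.testBit_lt_two_pow hmlt]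
      have h2 : (List.range (2 ^ n)).map
          ((fun m => F ((List.range (n + 1)).map (fun i => m.testBit i))) ∘ (2 ^ n + ·))
          = (List.range (2 ^ n)).map
            (fun m => F (((List.range n).map (fun i => m.testBit i)) ++ [true])) := by
        apply List.map_congr_left
        intro m hm
        have hmlt : m < 2 ^ n := List.mem_range.mp hm
        simp only [Function.comp]
        rw [List.range_succ, List.map_append]
        have hmap : (List.range n).map (fun i => (2 ^ n + m).testBit i)
            = (List.range n).map (fun i => m.testBit i) := by
          apply List.map_congr_left
          intro i hi
          exact Nat.testBit_two_pow_add_gt (List.mem_range.mp hi) m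
        rw [hmap]
        simp [Nat.testBit_two_pow_add_eq, Nat.testBit_lt_two_pow hmlt]
      rw [h1, h2]
      rw [show ((List.range (2 ^ n)).map
            (fun m => F (((List.range n).map (fun i => m.testBit i)) ++ [false]))).sum
          = ((prod2 n).map (fun t => F (t ++ [false]))).sum from ih (fun t => F (t ++ [false]))]
      rw [show ((List.range (2 ^ n)).map
            (fun m => F (((List.range n).map (fun i => m.testBit i)) ++ [true]))).sum
          = ((prod2 n).map (fun t => F (t ++ [true]))).sum from ih (fun t => F (t ++ [true]))]
      rw [show prod2 (n + 1) = (prod2 n).flatMap (fun t => [t ++ [false], t ++ [true]]) from rfl,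
        sum_flatMap_pair, sum_map_add]

-- per-row-subset value of A's inner loop
theorem A_inner (c : List (List String)) (n W : Nat) (k : Int) (ch : List Bool) (ret : Int) :
    (prod2 W).foldl (fun ret cw =>
        let cnt : Int := (List.range n).foldl (fun cnt i =>
          (List.range W).foldl (fun cnt j =>
            if ch.getD i false && cw.getD j false && ((c.getD i []).getD j "" == "#")
            then cnt + 1 else cnt) cnt) 0
        if cnt = k then ret + 1 else ret) ret
      = ret + Ncnt (colvF c n W (fun i => ch.getD i false)) k := by
  show (prod2 W).foldl (fun ret cw => if _ = k then ret + 1 else ret) ret = _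
  rw [foldl_if_count]
  unfold Ncnt
  rw [colvF_length]
  congr 1
  apply congrArg List.sum
  apply List.map_congr_left
  intro cw hcw
  rw [cnt_eq_dot c n W ch cw (prod2_length hcw)]

-- per-mask value of B's body
theorem B_inner (c : List (List String)) (n W : Nat) (k : Int) (mask : Nat) (ret : Int) :
    (let col : List Int := (List.range W).map (fun j =>
        (List.range n).foldl (fun s i =>
          if mask.testBit i && ((c.getD i []).getD j "" == "#") then s + 1 else s) 0)
      let dp := col.foldl dpStep [1]
      if 0 ≤ k ∧ k < (dp.length : Int) then ret + dp.getD k.toNat 0 else ret)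
      = ret + Ncnt (colvF c n W (fun i => mask.testBit i)) k := by
  have hcol : (List.range W).map (fun j =>
      (List.range n).foldl (fun s i =>
        if mask.testBit i && ((c.getD i []).getD j "" == "#") then s + 1 else s) 0)
      = colvF c n W (fun i => mask.testBit i) := by
    unfold colvF
    apply List.map_congr_left
    intro j _
    rw [foldl_if_count, zero_add]
  show (if 0 ≤ k ∧ k < (((((List.range W).map (fun j =>
          (List.range n).foldl (fun s i =>
            if mask.testBit i && ((c.getD i []).getD j "" == "#") then s + 1 else s) 0)).foldl
          dpStep [1]).length : Int))
      then ret + ((((List.range W).map (fun j =>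
          (List.range n).foldl (fun s i =>
            if mask.testBit i && ((c.getD i []).getD j "" == "#") then s + 1 else s) 0)).foldl
          dpStep [1]).getD k.toNat 0)
      else ret) = _
  rw [hcol]
  set dp := (colvF c n W (fun i => mask.testBit i)).foldl dpStep [1] with hdp
  have hG := G_foldl_dpStep (colvF c n W (fun i => mask.testBit i))
    (colvF_nonneg c n W _) k
  rw [← hdp] at hG
  by_cases hin : 0 ≤ k ∧ k < (dp.length : Int)
  · rw [if_pos hin, ← hG]
    unfold G
    rw [if_pos hin.1]
  · rw [if_neg hin, ← hG, G_oob _ _ hin]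
    ring

-- ===== VERDICT (by name: the statement is the Claim_ definition above) =====
theorem hv_spec : Claim_equal_hv := by
  intro c h_ w k _ _
  unfold Spec_hv hv hv_alt
  set n := h_.toNat
  set W := w.toNat
  have hA : (fun (ret : Int) (ch : List Bool) =>
      (prod2 W).foldl (fun ret cw =>
        let cnt : Int := (List.range n).foldl (fun cnt i =>
          (List.range W).foldl (fun cnt j =>
            if ch.getD i false && cw.getD j false && ((c.getD i []).getD j "" == "#")
            then cnt + 1 else cnt) cnt) 0
        if cnt = k then ret + 1 else ret) ret)
      = fun (ret : Int) (ch : List Bool) => ret + Ncnt (colvF c n W (fun i => ch.getD i false)) k := by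
    funext ret ch
    exact A_inner c n W k ch ret
  have hB : (fun (ret : Int) (mask : Nat) =>
      (let col : List Int := (List.range W).map (fun j =>
          (List.range n).foldl (fun s i =>
            if mask.testBit i && ((c.getD i []).getD j "" == "#") then s + 1 else s) 0)
        let dp := col.foldl dpStep [1]
        if 0 ≤ k ∧ k < (dp.length : Int) then ret + dp.getD k.toNat 0 else ret))
      = fun (ret : Int) (mask : Nat) => ret + Ncnt (colvF c n W (fun i => mask.testBit i)) k := by
    funext ret mask
    exact B_inner c n W k mask ret
  rw [hA, hB, foldl_addf, foldl_addf, zero_add, zero_add]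
  rw [← sum_bits n (fun ch => Ncnt (colvF c n W (fun i => ch.getD i false)) k)]
  apply congrArg
  apply List.map_congr_left
  intro m _
  apply congrArg (fun vs => Ncnt vs k)
  apply colvF_congr
  intro i hi
  simp [List.getD_eq_getElem?_getD, hi]
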